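-- pv_equiv track=rewrite | github.com/beomseok-kang/Algorithms-Python | 이코테/C15/30-2.py | solution
-- ===== SOURCE A (Python) =====
-- def question_length(query, left_search):
--   if left_search:
--     return len(query) - len(query.lstrip('?'))
--   else:
--     return len(query) - len(query.rstrip('?'))
--
-- def search_left(array, query, qm_length, start, end, left_search):
--     if not array:
--         return 0
--     mid = (start + end) // 2
--     if not left_search:
--         while start <= end:
--             mid = (start + end) // 2
--             if max(array[mid], query) == query: # query_min = query, "fro??"
--                 start = mid + 1
--             else:
--                 end = mid - 1
--         return end
--     else:
--         query = ''.join(reversed(query))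
--         while start <= end:
--             mid = (start + end) // 2
--             if max(array[mid], query) == query:
--                 start = mid + 1
--             else:
--                 end = mid - 1
--         return end
--
-- def search_right(array, query, qm_length, start, end, left_search):
--     if not array:
--         return 1
--     mid = (start + end) // 2
--     if not left_search:
--         query = query[:-qm_length] + '~' * qm_length
--         while start <= end:
--             mid = (start + end) // 2
--             if min(array[mid], query) == query:
--                 end = mid - 1
--             else:
--                 start = mid + 1
--         return start
--     else:
--         query = ''.join(reversed(query))[:-qm_length] + '~' * qm_length
--         while start <= end:
--             mid = (start + end) // 2
--             if min(array[mid], query) == query: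
--                 end = mid - 1
--             else:
--                 start = mid + 1
--         return start
--
-- def solution(words, queries):
--     arrays = [[[] for _ in range(2)] for _ in range(10001)]
--     for word in words:
--         arrays[len(word)][0].append(word)
--     for array in arrays:
--         array[1] = list(map(lambda x: ''.join(reversed(x)), array[0]))
--         array[0].sort()
--         array[1].sort()
--     counts = []
--     for query in queries:
--         query_len = len(query)
--         left_search = (query[0] == '?')
--         array = arrays[query_len][int(left_search)]
--         qm_length = question_length(query, left_search)
--
--         start = 0
--         end = len(array) - 1
--         left = search_left(array, query, qm_length, start, end, left_search)
--         right = search_right(array, query, qm_length, start, end, left_search)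
--         counts.append(right - left - 1)
--     return counts
-- ===== SOURCE B (Python) =====
-- def solution(words, queries):
--     by_len = {}
--     for w in words:
--         by_len.setdefault(len(w), []).append(w)
--     counts = []
--     for q in queries:
--         left = q[0] == '?'
--         key = q[::-1] if left else q
--         qm = len(key) - len(key.rstrip('?'))
--         high = key[:-qm] + '~' * qm
--         hi = lo = 0
--         for w in by_len.get(len(q), []):
--             v = w[::-1] if left else w
--             if v < high:
--                 hi += 1
--             if v <= key:
--                 lo += 1
--         counts.append(hi - lo)
--     return counts
-- ===== Notes on version B (the rewrite author's own statement) =====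
-- stated objective: simpler
-- what changed: Replaces A's 10001-slot bucket table, per-length sorting of forward and reversed word lists and two hand-written binary searches by a dict keyed on word length and one linear pass per query that counts words strictly between the same lower string and upper sentinel string.
import Mathlib
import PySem

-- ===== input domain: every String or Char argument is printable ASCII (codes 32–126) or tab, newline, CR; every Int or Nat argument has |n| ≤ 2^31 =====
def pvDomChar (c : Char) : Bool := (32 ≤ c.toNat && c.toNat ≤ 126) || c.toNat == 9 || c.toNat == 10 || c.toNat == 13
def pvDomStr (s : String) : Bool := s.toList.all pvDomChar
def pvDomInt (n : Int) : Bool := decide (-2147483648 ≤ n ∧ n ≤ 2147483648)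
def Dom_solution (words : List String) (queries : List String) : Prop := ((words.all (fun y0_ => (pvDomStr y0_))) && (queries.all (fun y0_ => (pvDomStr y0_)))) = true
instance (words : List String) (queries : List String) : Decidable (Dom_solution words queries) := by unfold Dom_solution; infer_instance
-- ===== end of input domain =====

-- B replaces the 10001-slot table, the per-length sorts and the hand-written binary searches
-- by a length-keyed dict and one linear counting pass per query (objective: simpler).

-- ''.join(reversed(s)) (exact: join of the reversed characters)
def pvRev (s : String) : String := String.ofList s.toList.reverse

-- ===== PORT A =====
-- s.lstrip('?') / s.rstrip('?') (strip a single given char; exact, hand port on the char list)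
def pvLstripQm (cs : List Char) : List Char := cs.dropWhile (· == '?')
def pvRstripQm (cs : List Char) : List Char := (cs.reverse.dropWhile (· == '?')).reverse

def question_length (query : String) (left_search : Bool) : Int :=
  if left_search then
    PySem.Str.len query - ((pvLstripQm query.toList).length : Int)
  else
    PySem.Str.len query - ((pvRstripQm query.toList).length : Int)

-- the while-loop of search_left ('if max(array[mid], query) == query: start = mid+1 else end = mid-1; return end');
-- array[mid] is ported with pyGetD: the loop only runs with 0 ≤ start ≤ mid ≤ end < len(array), so the default is never read
def pvLoopLeft (array : List String) (query : String) (start e : Int) : Int :=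
  if h : start ≤ e then
    let mid := PySem.Int.floordiv (start + e) 2
    if max (PySem.List.pyGetD array mid "") query = query then
      pvLoopLeft array query (mid + 1) e
    else
      pvLoopLeft array query start (mid - 1)
  else e
termination_by (e - start + 1).toNat
decreasing_by
  · have h2 := PySem.Int.floordiv_two_mid_bounds h; omega
  · have h2 := PySem.Int.floordiv_two_mid_bounds h; omega

def search_left (array : List String) (query : String) (_qm_length start e : Int)
    (left_search : Bool) : Int :=
  if array = [] then 0
  else if !left_search then pvLoopLeft array query start e
  else pvLoopLeft array (pvRev query) start e

-- query[:-qm_length] + '~' * qm_length   (qm_length ≥ 0 always; [:-0] is the empty slice, as in Python)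
def pvUpper (query : String) (qm_length : Int) : String :=
  String.ofList (PySem.List.slice query.toList none (some (-qm_length))
    ++ List.replicate qm_length.toNat '~')

-- the while-loop of search_right ('if min(array[mid], query) == query: end = mid-1 else start = mid+1; return start')
def pvLoopRight (array : List String) (query : String) (start e : Int) : Int :=
  if h : start ≤ e then
    let mid := PySem.Int.floordiv (start + e) 2
    if min (PySem.List.pyGetD array mid "") query = query then
      pvLoopRight array query start (mid - 1)
    else
      pvLoopRight array query (mid + 1) e
  else start
termination_by (e - start + 1).toNat
decreasing_by
  · have h2 := PySem.Int.floordiv_two_mid_bounds h; omega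
  · have h2 := PySem.Int.floordiv_two_mid_bounds h; omega

def search_right (array : List String) (query : String) (qm_length start e : Int)
    (left_search : Bool) : Int :=
  if array = [] then 1
  else if !left_search then pvLoopRight array (pvUpper query qm_length) start e
  else pvLoopRight array (pvUpper (pvRev query) qm_length) start e

def pvArraysInit : List (List String × List String) :=
  (List.range 10001).map (fun _ => ([], []))

-- 'for word in words: arrays[len(word)][0].append(word)'
-- List.modify is exact for len(word) ≤ 10000; Python raises IndexError beyond that (excluded by Pre_)
def pvFill (words : List String) : List (List String × List String) :=
  words.foldl (fun arrs word => arrs.modify word.length (fun a => (a.1 ++ [word], a.2)))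
    pvArraysInit

def solution (words : List String) (queries : List String) : List Int :=
  let arrays := (pvFill words).map (fun a =>
    (PySem.List.sorted a.1 (fun x => x), PySem.List.sorted (a.1.map pvRev) (fun x => x)))
  queries.foldl (fun counts query =>
    let query_len := PySem.Str.len query
    -- query[0]: Pre_ excludes the empty query, where Python raises IndexError
    let left_search := query.toList.headD ' ' == '?'
    -- arrays[query_len][int(left_search)]: IndexError for query_len > 10000, excluded by Pre_
    let array := if left_search then (PySem.List.pyGetD arrays query_len ([], [])).2
                 else (PySem.List.pyGetD arrays query_len ([], [])).1
    let qm_length := question_length query left_search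
    let start : Int := 0
    let e : Int := (array.length : Int) - 1
    let left := search_left array query qm_length start e left_search
    let right := search_right array query qm_length start e left_search
    counts ++ [right - left - 1]) []

-- ===== PORT B =====
def solution_alt (words : List String) (queries : List String) : List Int :=
  let byLen : PySem.Dict Int (List String) :=
    words.foldl (fun d w => d.modify (PySem.Str.len w) [] (fun l => l ++ [w]))
      PySem.Dict.empty
  queries.foldl (fun counts q =>
    let left := q.toList.headD ' ' == '?'        -- q[0] == '?'; Pre_ excludes the empty query
    let key := if left then pvRev q else q       -- q[::-1] when the wildcard is a prefix
    -- qm = len(key) - len(key.rstrip('?'))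
    let qm : Int := (key.toList.length : Int) - (((key.toList.reverse.dropWhile (· == '?')).reverse.length : Nat) : Int)
    -- high = key[:-qm] + '~' * qm
    let high := String.ofList (PySem.List.slice key.toList none (some (-qm))
      ++ List.replicate qm.toNat '~')
    let c := (byLen.getD (PySem.Str.len q) []).foldl (fun (p : Int × Int) w =>
        let v := if left then pvRev w else w
        ((if v < high then p.1 + 1 else p.1), (if v ≤ key then p.2 + 1 else p.2))) (0, 0)
    counts ++ [c.1 - c.2]) []

-- ===== PRECONDITION & SPEC =====
-- Pre_ excludes exactly the inputs on which A raises IndexError: an empty query (query[0]),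
-- and a word or query longer than 10000 (A's bucket table has indices 0..10000 only).
def Pre_solution (words : List String) (queries : List String) : Prop :=
  (∀ w ∈ words, w.length ≤ 10000) ∧ (∀ q ∈ queries, q ≠ "" ∧ q.length ≤ 10000)
instance (words : List String) (queries : List String) : Decidable (Pre_solution words queries) := by
  unfold Pre_solution; infer_instance

def pvWitness_solution : List String × List String := (["frodo", "front", "ab"], ["fro??", "?????", "??b"])

def Spec_solution (words : List String) (queries : List String) (out : List Int) : Prop := out = solution_alt words queries
instance (words : List String) (queries : List String) (out : List Int) : Decidable (Spec_solution words queries out) := by unfold Spec_solution; infer_instance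

-- ===== CLAIM (what is proved, stated in full; the proofs are below) =====
def Claim_equal_solution : Prop := ∀ (words : List String) (queries : List String), Dom_solution words queries → Pre_solution words queries → Spec_solution words queries (solution words queries)

-- ===== LEMMAS AND PROOFS =====

-- a list whose first k elements satisfy p and whose others do not has countP = k
theorem pv_countP_boundary {α : Type} (l : List α) (p : α → Bool) (k : Nat) (hk : k ≤ l.length)
    (h1 : ∀ i (h : i < l.length), i < k → p l[i])
    (h2 : ∀ i (h : i < l.length), k ≤ i → ¬ p l[i]) :
    l.countP p = k := by
  have hsplit : l = l.take k ++ l.drop k := (List.take_append_drop k l).symm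
  rw [hsplit, List.countP_append]
  have ht : (l.take k).countP p = (l.take k).length := by
    rw [List.countP_eq_length]
    intro x hx
    obtain ⟨i, hi, hx⟩ := List.mem_iff_getElem.mp hx
    have hi' : i < l.length := by simp at hi; omega
    have : (l.take k)[i] = l[i] := List.getElem_take ..
    subst hx; rw [this]
    exact h1 i hi' (by simp at hi; omega)
  have hd : (l.drop k).countP p = 0 := by
    rw [List.countP_eq_zero]
    intro x hx
    obtain ⟨i, hi, hx⟩ := List.mem_iff_getElem.mp hx
    have hi' : k + i < l.length := by simp at hi; omega
    have : (l.drop k)[i] = l[k + i] := by rw [List.getElem_drop]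
    subst hx; rw [this]
    exact h2 (k + i) hi' (by omega)
  rw [ht, hd, List.length_take]
  omega

-- pvLoopLeft on a sorted array with the binary-search invariant returns (#{≤ query}) - 1
theorem pvLoopLeft_spec (n : Nat) : ∀ (array : List String) (q : String) (s e : Int),
    (e - s + 1).toNat ≤ n →
    array.Pairwise (· ≤ ·) →
    0 ≤ s → e < (array.length : Int) → s ≤ e + 1 →
    (∀ i (h : i < array.length), (i : Int) < s → array[i] ≤ q) →
    (∀ i (h : i < array.length), e < (i : Int) → ¬ array[i] ≤ q) →
    pvLoopLeft array q s e = (array.countP (fun x => decide (x ≤ q)) : Int) - 1 := by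
  induction n with
  | zero =>
    intro array q s e hn hsorted hs he hse h1 h2
    rw [pvLoopLeft, dif_neg (by omega)]
    have hk : s.toNat ≤ array.length := by omega
    have hc := pv_countP_boundary array (fun x => decide (x ≤ q)) s.toNat hk
      (fun i h hi => by simpa using h1 i h (by omega))
      (fun i h hi => by simpa using h2 i h (by omega))
    rw [hc]; omega
  | succ n ih =>
    intro array q s e hn hsorted hs he hse h1 h2
    by_cases hle : s ≤ e
    · rw [pvLoopLeft, dif_pos hle]
      have hmid := PySem.Int.floordiv_two_mid_bounds (lo := s) (hi := e) hle
      set mid := PySem.Int.floordiv (s + e) 2 with hmiddef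
      have hmn : mid.toNat < array.length := by omega
      have hget : PySem.List.pyGetD array mid "" = array[mid.toNat] :=
        PySem.List.pyGetD_eq_getElem array "" (by omega) (by omega)
      have hpw := List.pairwise_iff_getElem.mp hsorted
      by_cases hc : max (PySem.List.pyGetD array mid "") q = q
      · rw [if_pos hc]
        have hcm : array[mid.toNat] ≤ q := by
          rw [hget] at hc; exact max_eq_right_iff.mp hc
        refine ih array q (mid + 1) e (by omega) hsorted (by omega) he (by omega) ?_ h2
        intro i h hi
        rcases lt_trichotomy (i : Int) ((mid.toNat : Int)) with hlt | heq | hgt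
        · by_cases his : (i : Int) < s
          · exact h1 i h his
          · exact le_trans (hpw i mid.toNat h hmn (by omega)) hcm
        · have : i = mid.toNat := by omega
          subst this; exact hcm
        · omega
      · rw [if_neg hc]
        have hcm : ¬ array[mid.toNat] ≤ q := by
          rw [hget] at hc; exact fun hle2 => hc (max_eq_right_iff.mpr hle2)
        refine ih array q s (mid - 1) (by omega) hsorted hs (by omega) (by omega) h1 ?_
        intro i h hi
        by_cases hei : e < (i : Int)
        · exact h2 i h hei
        · intro hq
          rcases lt_trichotomy ((mid.toNat : Int)) (i : Int) with hlt | heq | hgt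
          · exact hcm (le_trans (hpw mid.toNat i hmn h (by omega)) hq)
          · have : i = mid.toNat := by omega
            subst this; exact hcm hq
          · omega
    · rw [pvLoopLeft, dif_neg hle]
      have hk : s.toNat ≤ array.length := by omega
      have hc := pv_countP_boundary array (fun x => decide (x ≤ q)) s.toNat hk
        (fun i h hi => by simpa using h1 i h (by omega))
        (fun i h hi => by simpa using h2 i h (by omega))
      rw [hc]; omega

-- pvLoopRight on a sorted array with the invariant returns #{< query}
theorem pvLoopRight_spec (n : Nat) : ∀ (array : List String) (q : String) (s e : Int),
    (e - s + 1).toNat ≤ n →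
    array.Pairwise (· ≤ ·) →
    0 ≤ s → e < (array.length : Int) → s ≤ e + 1 →
    (∀ i (h : i < array.length), (i : Int) < s → array[i] < q) →
    (∀ i (h : i < array.length), e < (i : Int) → ¬ array[i] < q) →
    pvLoopRight array q s e = (array.countP (fun x => decide (x < q)) : Int) := by
  induction n with
  | zero =>
    intro array q s e hn hsorted hs he hse h1 h2
    rw [pvLoopRight, dif_neg (by omega)]
    have hk : s.toNat ≤ array.length := by omega
    have hc := pv_countP_boundary array (fun x => decide (x < q)) s.toNat hk
      (fun i h hi => by simpa using h1 i h (by omega))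
      (fun i h hi => by simpa using h2 i h (by omega))
    rw [hc]; omega
  | succ n ih =>
    intro array q s e hn hsorted hs he hse h1 h2
    by_cases hle : s ≤ e
    · rw [pvLoopRight, dif_pos hle]
      have hmid := PySem.Int.floordiv_two_mid_bounds (lo := s) (hi := e) hle
      set mid := PySem.Int.floordiv (s + e) 2 with hmiddef
      have hmn : mid.toNat < array.length := by omega
      have hget : PySem.List.pyGetD array mid "" = array[mid.toNat] :=
        PySem.List.pyGetD_eq_getElem array "" (by omega) (by omega)
      have hpw := List.pairwise_iff_getElem.mp hsorted
      by_cases hc : min (PySem.List.pyGetD array mid "") q = q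
      · rw [if_pos hc]
        have hcm : ¬ array[mid.toNat] < q := by
          rw [hget] at hc; exact not_lt_of_ge (min_eq_right_iff.mp hc)
        refine ih array q s (mid - 1) (by omega) hsorted hs (by omega) (by omega) h1 ?_
        intro i h hi
        by_cases hei : e < (i : Int)
        · exact h2 i h hei
        · intro hq
          rcases lt_trichotomy ((mid.toNat : Int)) (i : Int) with hlt | heq | hgt
          · exact hcm (lt_of_le_of_lt (hpw mid.toNat i hmn h (by omega)) hq)
          · have : i = mid.toNat := by omega
            subst this; exact hcm hq
          · omega
      · rw [if_neg hc]
        have hcm : array[mid.toNat] < q := by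
          rw [hget] at hc
          rcases lt_or_ge (array[mid.toNat]) q with h' | h'
          · exact h'
          · exact absurd (min_eq_right_iff.mpr h') hc
        refine ih array q (mid + 1) e (by omega) hsorted (by omega) he (by omega) ?_ h2
        intro i h hi
        rcases lt_trichotomy (i : Int) ((mid.toNat : Int)) with hlt | heq | hgt
        · by_cases his : (i : Int) < s
          · exact h1 i h his
          · exact lt_of_le_of_lt (hpw i mid.toNat h hmn (by omega)) hcm
        · have : i = mid.toNat := by omega
          subst this; exact hcm
        · omega
    · rw [pvLoopRight, dif_neg hle]
      have hk : s.toNat ≤ array.length := by omega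
      have hc := pv_countP_boundary array (fun x => decide (x < q)) s.toNat hk
        (fun i h hi => by simpa using h1 i h (by omega))
        (fun i h hi => by simpa using h2 i h (by omega))
      rw [hc]; omega

theorem pvArraysInit_length : pvArraysInit.length = 10001 := by
  rw [pvArraysInit, List.length_map, List.length_range]

theorem pv_fill_go_length : ∀ (ws : List String) (arrs : List (List String × List String)),
    (ws.foldl (fun arrs word => arrs.modify word.length (fun a => (a.1 ++ [word], a.2))) arrs).length
      = arrs.length := by
  intro ws
  induction ws with
  | nil => intro arrs; rfl
  | cons w ws ih => intro arrs; rw [List.foldl_cons, ih, List.length_modify]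

theorem pvFill_length (words : List String) : (pvFill words).length = 10001 := by
  rw [pvFill, pv_fill_go_length, pvArraysInit_length]

theorem pv_fill_go : ∀ (ws : List String) (arrs : List (List String × List String))
    (L : Nat), L < arrs.length →
    (ws.foldl (fun arrs word => arrs.modify word.length (fun a => (a.1 ++ [word], a.2))) arrs).getD L ([], [])
      = ((arrs.getD L ([], [])).1 ++ ws.filter (fun w => w.length == L),
         (arrs.getD L ([], [])).2) := by
  intro ws
  induction ws with
  | nil => intro arrs L _; simp
  | cons w ws ih =>
    intro arrs L hL
    rw [List.foldl_cons]
    have hL' : L < (arrs.modify w.length (fun a => (a.1 ++ [w], a.2))).length := by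
      rw [List.length_modify]; exact hL
    rw [ih _ L hL']
    have hmod : (arrs.modify w.length (fun a => (a.1 ++ [w], a.2))).getD L ([], [])
        = if w.length = L then ((arrs.getD L ([], [])).1 ++ [w], (arrs.getD L ([], [])).2)
          else arrs.getD L ([], []) := by
      rw [List.getD_eq_getElem _ _ hL', List.getD_eq_getElem _ _ hL, List.getElem_modify]
    rw [hmod]
    by_cases hwl : w.length = L
    · simp only [List.filter_cons, hwl]
      simp
    · simp only [List.filter_cons]
      have : (w.length == L) = false := by simp [hwl]
      simp [hwl, this]

theorem pvFill_get (words : List String) (L : Nat) (hL : L < 10001) :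
    (pvFill words).getD L ([], [])
      = (words.filter (fun w => w.length == L), []) := by
  rw [pvFill, pv_fill_go words pvArraysInit L (by rw [pvArraysInit_length]; exact hL)]
  have h0 : pvArraysInit.getD L ([], []) = ([], []) := by
    rw [pvArraysInit, List.getD_eq_getElem?_getD, List.getElem?_map, List.getElem?_range hL]
    rfl
  rw [h0]
  simp

theorem pvDict_get (words : List String) (L : Int) :
    (words.foldl (fun d w => d.modify (PySem.Str.len w) [] (fun l => l ++ [w]))
        (PySem.Dict.empty : PySem.Dict Int (List String))).getD L []
      = words.filter (fun w => ((w.length : Int) == L)) := by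
  have h := PySem.Dict.getD_foldl_modify_append
    (l := words.map (fun w => ((PySem.Str.len w : Int), w)))
    (d := (PySem.Dict.empty : PySem.Dict Int (List String))) (c := L)
  rw [List.foldl_map] at h
  simp only [PySem.Dict.getD_empty, List.nil_append] at h
  rw [h, List.filter_map, List.map_map]
  have hp : ((fun (p : Int × String) => p.1 == L) ∘ (fun w => ((PySem.Str.len w : Int), w)))
      = fun w => ((w.length : Int) == L) := by
    funext w; simp [pysem]
  have h2 : ((fun (x : Int × String) => x.2) ∘ fun (w : String) => ((PySem.Str.len w), w)) = id := by
    funext w; rfl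
  rw [hp, h2, List.map_id]

theorem pv_beq_cast (a b : Nat) : (((a : Int)) == ((b : Int))) = (a == b) := by
  apply Bool.eq_iff_iff.mpr
  simp

theorem pv_countP_rev (B0 : List String) (p : String → Bool) :
    B0.countP (fun w => p (pvRev w)) = (B0.map pvRev).countP p := by
  rw [List.countP_map]
  rfl

-- A's empty-bucket short cut and its two binary searches compute the two boundary counts
theorem pv_loops_count (B1 : List String) (qOrig : String) (qm : Int) (ls : Bool) :
    search_right (PySem.List.sorted B1 (fun x => x)) qOrig qm 0
        (((PySem.List.sorted B1 (fun x => x)).length : Int) - 1) ls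
      - search_left (PySem.List.sorted B1 (fun x => x)) qOrig qm 0
        (((PySem.List.sorted B1 (fun x => x)).length : Int) - 1) ls - 1
    = (B1.countP (fun v => decide (v < pvUpper (if ls then pvRev qOrig else qOrig) qm)) : Int)
      - (B1.countP (fun v => decide (v ≤ (if ls then pvRev qOrig else qOrig))) : Int) := by
  set X : List String := PySem.List.sorted B1 (fun x => x) with hXdef
  by_cases hnil : X = []
  · have hB1 : B1 = [] := (PySem.List.sorted_eq_nil_iff _ _ _).mp (hXdef ▸ hnil)
    rw [search_left, search_right, if_pos hnil, if_pos hnil, hB1]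
    simp
  · have hsorted : X.Pairwise (· ≤ ·) := by
      rw [hXdef]
      exact PySem.List.sorted_pairwise B1 (fun x => x)
    have hperm : X.Perm B1 := hXdef ▸ PySem.List.sorted_perm B1 (fun x => x) false
    have hXpos : 0 < X.length := List.length_pos_iff.mpr hnil
    have hsl : search_left X qOrig qm 0 ((X.length : Int) - 1) ls
        = pvLoopLeft X (if ls then pvRev qOrig else qOrig) 0 ((X.length : Int) - 1) := by
      rw [search_left, if_neg hnil]
      cases ls <;> simp
    have hsr : search_right X qOrig qm 0 ((X.length : Int) - 1) ls
        = pvLoopRight X (pvUpper (if ls then pvRev qOrig else qOrig) qm) 0 ((X.length : Int) - 1) := by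
      rw [search_right, if_neg hnil]
      cases ls <;> simp
    rw [hsl, hsr]
    rw [pvLoopLeft_spec (((X.length : Int) - 1) - 0 + 1).toNat X _ 0 ((X.length : Int) - 1)
      (le_refl _) hsorted (by omega) (by omega) (by omega)
      (fun i h hi => by omega) (fun i h hi => by omega)]
    rw [pvLoopRight_spec (((X.length : Int) - 1) - 0 + 1).toNat X _ 0 ((X.length : Int) - 1)
      (le_refl _) hsorted (by omega) (by omega) (by omega)
      (fun i h hi => by omega) (fun i h hi => by omega)]
    rw [hperm.countP_eq (fun x => decide (x < pvUpper (if ls then pvRev qOrig else qOrig) qm)),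
      hperm.countP_eq (fun x => decide (x ≤ (if ls then pvRev qOrig else qOrig)))]
    omega

-- the per-query values agree
theorem pv_query_eq (words : List String) (q : String)
    (_hw : ∀ w ∈ words, w.length ≤ 10000) (_hq : q ≠ "") (hql : q.length ≤ 10000) :
    (let arrays := (pvFill words).map (fun a =>
        (PySem.List.sorted a.1 (fun x => x), PySem.List.sorted (a.1.map pvRev) (fun x => x)))
     let query_len := PySem.Str.len q
     let left_search := q.toList.headD ' ' == '?'
     let array := if left_search then (PySem.List.pyGetD arrays query_len ([], [])).2
                  else (PySem.List.pyGetD arrays query_len ([], [])).1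
     let qm_length := question_length q left_search
     search_right array q qm_length 0 ((array.length : Int) - 1) left_search
       - search_left array q qm_length 0 ((array.length : Int) - 1) left_search - 1)
    = (let byLen : PySem.Dict Int (List String) :=
        words.foldl (fun d w => d.modify (PySem.Str.len w) [] (fun l => l ++ [w]))
          PySem.Dict.empty
       let left := q.toList.headD ' ' == '?'
       let key := if left then pvRev q else q
       let qm : Int := (key.toList.length : Int) - (((key.toList.reverse.dropWhile (· == '?')).reverse.length : Nat) : Int)
       let high := String.ofList (PySem.List.slice key.toList none (some (-qm))
         ++ List.replicate qm.toNat '~')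
       let c := (byLen.getD (PySem.Str.len q) []).foldl (fun (p : Int × Int) w =>
           let v := if left then pvRev w else w
           ((if v < high then p.1 + 1 else p.1), (if v ≤ key then p.2 + 1 else p.2))) (0, 0)
       c.1 - c.2) := by
  dsimp only
  have hlen : PySem.Str.len q = (q.length : Int) := by simp [pysem]
  have hmaplen : ((pvFill words).map (fun a =>
      (PySem.List.sorted a.1 (fun x => x), PySem.List.sorted (a.1.map pvRev) (fun x => x)))).length = 10001 := by
    rw [List.length_map, pvFill_length]
  have harr : PySem.List.pyGetD ((pvFill words).map (fun a =>
      (PySem.List.sorted a.1 (fun x => x), PySem.List.sorted (a.1.map pvRev) (fun x => x))))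
      (PySem.Str.len q) ([], [])
      = (PySem.List.sorted (words.filter (fun w => w.length == q.length)) (fun x => x),
         PySem.List.sorted ((words.filter (fun w => w.length == q.length)).map pvRev) (fun x => x)) := by
    rw [hlen, PySem.List.pyGetD_natCast]
    rw [List.getD_eq_getElem _ _ (by rw [hmaplen]; omega), List.getElem_map]
    have : (pvFill words)[q.length]'(by rw [pvFill_length]; omega)
        = ((pvFill words).getD q.length ([], [])) := by
      rw [List.getD_eq_getElem _ _ (by rw [pvFill_length]; omega)]
    rw [this, pvFill_get words q.length (by omega)]
  have hdict : (words.foldl (fun d w => d.modify (PySem.Str.len w) [] (fun l => l ++ [w]))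
        (PySem.Dict.empty : PySem.Dict Int (List String))).getD (PySem.Str.len q) []
      = words.filter (fun w => w.length == q.length) := by
    rw [hlen, pvDict_get]
    apply List.filter_congr
    intro w _
    exact pv_beq_cast w.length q.length
  rw [harr, hdict]
  cases hls : (q.toList.headD ' ' == '?')
  · -- no leading '?': forward bucket, forward words
    simp only [Bool.false_eq_true, if_false]
    have hqm : question_length q false
        = ((q.toList.length : Int) - (((q.toList.reverse.dropWhile (· == '?')).reverse.length : Nat) : Int)) := by
      rw [question_length, if_neg Bool.false_ne_true]
      simp [pvRstripQm]
    rw [hqm]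
    rw [PySem.List.foldl_prod_mk
      (f := fun acc w => if w < String.ofList (PySem.List.slice q.toList none
          (some (-((q.toList.length : Int) - (((q.toList.reverse.dropWhile (· == '?')).reverse.length : Nat) : Int))))
          ++ List.replicate ((q.toList.length : Int) - (((q.toList.reverse.dropWhile (· == '?')).reverse.length : Nat) : Int)).toNat '~') then acc + 1 else acc)
      (g := fun acc w => if w ≤ q then acc + 1 else acc)]
    rw [PySem.List.foldl_ite_add_one, PySem.List.foldl_ite_add_one]
    have hcore := pv_loops_count (words.filter (fun w => w.length == q.length))
      q ((q.toList.length : Int) - (((q.toList.reverse.dropWhile (· == '?')).reverse.length : Nat) : Int)) false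
    simp only [Bool.false_eq_true, if_false, pvUpper] at hcore
    rw [hcore]
    omega
  · -- leading '?': reversed bucket, reversed words
    simp only [if_true]
    have hqm : question_length q true
        = (((pvRev q).toList.length : Int) - ((((pvRev q).toList.reverse.dropWhile (· == '?')).reverse.length : Nat) : Int)) := by
      rw [question_length, if_pos rfl]
      simp [pvLstripQm, pvRev]
    rw [hqm]
    rw [PySem.List.foldl_prod_mk
      (f := fun acc w => if pvRev w < String.ofList (PySem.List.slice (pvRev q).toList none
          (some (-(((pvRev q).toList.length : Int) - ((((pvRev q).toList.reverse.dropWhile (· == '?')).reverse.length : Nat) : Int))))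
          ++ List.replicate (((pvRev q).toList.length : Int) - ((((pvRev q).toList.reverse.dropWhile (· == '?')).reverse.length : Nat) : Int)).toNat '~') then acc + 1 else acc)
      (g := fun acc w => if pvRev w ≤ pvRev q then acc + 1 else acc)]
    rw [PySem.List.foldl_ite_add_one, PySem.List.foldl_ite_add_one]
    have hcore := pv_loops_count ((words.filter (fun w => w.length == q.length)).map pvRev)
      q (((pvRev q).toList.length : Int) - ((((pvRev q).toList.reverse.dropWhile (· == '?')).reverse.length : Nat) : Int)) true
    simp only [if_true, pvUpper] at hcore
    rw [← pv_countP_rev, ← pv_countP_rev] at hcore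
    rw [hcore]
    omega

-- ===== VERDICT (by name: the statement is the Claim_ definition above) =====
theorem solution_spec : Claim_equal_solution := by
  intro words queries _hdom hpre
  unfold Spec_solution solution solution_alt
  rw [PySem.List.foldl_append_singleton_eq_map, PySem.List.foldl_append_singleton_eq_map]
  simp only [List.nil_append]
  refine List.map_congr_left ?_
  intro q hq
  exact pv_query_eq words q hpre.1 (hpre.2 q hq).1 (hpre.2 q hq).2
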